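-- pv_equiv track=rewrite | github.com/hyungmogu/algorithm-and-data-structure-exercises | codility_practice/leader/dominator_02.py | solution
-- ===== SOURCE A (Python) =====
-- def solution(A):
--     N = len(A)
--     index = 0
--     number_frequency = {}
--
--     if N == 0:
--         return -1
--
--     if N == 1:
--         return 0
--
--     #   1. for each number and index in A
--     while index < N:
--         number = A[index]
--         #   2. if number in number_frequency, raise count by 1, or if not, set its value to 1
--         if number in number_frequency:
--             number_frequency[number] += 1
--         else:
--             number_frequency[number] = 1
--
--         #   3. if number_frequency[number] is dominator, then return index
--         if number_frequency[number] > (N // 2):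
--             return index
--
--         index +=1
--     #   4. if all fails, then return -1
--     return -1
-- ===== SOURCE B (Python) =====
-- def solution(A):
--     t = len(A) // 2
--     counts = {}
--     for x in A:
--         counts[x] = counts.get(x, 0) + 1
--     dom = next((v for v, c in counts.items() if c > t), None)
--     if dom is None:
--         return -1
--     c = 0
--     for i, x in enumerate(A):
--         if x == dom:
--             c += 1
--             if c > t:
--                 return i
--     return -1
-- ===== Notes on version B (the rewrite author's own statement) =====
-- stated objective: alternative
-- what changed: A interleaves counting and the dominance test in one early-exit loop over a growing frequency dict; B first builds the complete frequency table, picks the value whose total count exceeds N//2 (unique if it exists), and then makes a second targeted pass over A that returns the index where that value's running count first exceeds N//2.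
import Mathlib
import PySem

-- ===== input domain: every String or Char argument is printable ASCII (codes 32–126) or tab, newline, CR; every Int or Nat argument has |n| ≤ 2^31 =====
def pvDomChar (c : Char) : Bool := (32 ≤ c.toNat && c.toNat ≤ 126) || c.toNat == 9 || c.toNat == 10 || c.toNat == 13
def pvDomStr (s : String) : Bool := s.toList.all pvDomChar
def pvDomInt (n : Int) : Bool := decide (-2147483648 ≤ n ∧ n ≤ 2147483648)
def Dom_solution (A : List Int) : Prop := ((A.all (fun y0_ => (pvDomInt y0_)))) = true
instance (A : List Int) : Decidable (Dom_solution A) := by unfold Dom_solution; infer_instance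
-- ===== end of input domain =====

-- B restructures A: full frequency table first, then a targeted second pass for the crossing
-- index of the dominator; same O(n) cost ("alternative"), return values proved equal everywhere.

-- ===== PORT A =====
-- while-loop of A: walks A sequentially (index/A[index]) carrying the growing frequency dict
def solLoopA : List Int → Int → Int → PySem.Dict Int Int → Int
  | [], _, _, _ => -1
  | n :: rest, N, idx, freq =>
    let freq' := if PySem.Dict.contains freq n
      then PySem.Dict.insert freq n (PySem.Dict.getD freq n 0 + 1)
      else PySem.Dict.insert freq n 1
    if PySem.Dict.getD freq' n 0 > PySem.Int.floordiv N 2 then idx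
    else solLoopA rest N (idx + 1) freq'

def solution (A : List Int) : Int :=
  let N : Int := (A.length : Int)
  if N == 0 then -1
  else if N == 1 then 0
  else solLoopA A N 0 PySem.Dict.empty

-- ===== PORT B =====
-- second pass of B: running count of the dominator v, return i when it crosses t
def solAltScan : List Int → Int → Int → Int → Int → Int
  | [], _, _, _, _ => -1
  | x :: rest, v, t, c, i =>
    if x == v then
      (if c + 1 > t then i else solAltScan rest v t (c + 1) (i + 1))
    else solAltScan rest v t c (i + 1)

def solution_alt (A : List Int) : Int :=
  let t : Int := PySem.Int.floordiv (A.length : Int) 2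
  let counts := A.foldl (fun d x => PySem.Dict.insert d x (PySem.Dict.getD d x 0 + 1)) PySem.Dict.empty
  match (PySem.Dict.items counts).find? (fun vc => decide (vc.2 > t)) with
  | some vc => solAltScan A vc.1 t 0 0
  | none => -1

-- ===== PRECONDITION & SPEC =====
def Spec_solution (A : List Int) (out : Int) : Prop := out = solution_alt A
instance (A : List Int) (out : Int) : Decidable (Spec_solution A out) := by unfold Spec_solution; infer_instance

-- ===== CLAIM (what is proved, stated in full; the proofs are below) =====
def Claim_equal_solution : Prop := ∀ (A : List Int), Dom_solution A → Spec_solution A (solution A)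

-- ===== LEMMAS AND PROOFS =====

-- two distinct values cannot both occur more than half the time
lemma count_add_count_le (l : List Int) (v w : Int) (h : v ≠ w) :
    l.count v + l.count w ≤ l.length := by
  induction l with
  | nil => simp
  | cons a l ih =>
    simp only [List.count_cons, List.length_cons]
    by_cases h1 : a = v <;> by_cases h2 : a = w <;>
      simp [h1, h2, h, Ne.symm h] <;> omega

lemma uniq_major (l : List Int) (v w : Int)
    (hv : l.length / 2 < l.count v) (hw : l.length / 2 < l.count w) : v = w := by
  by_contra hne
  have := count_add_count_le l v w hne
  omega

lemma floordiv_len (n : Nat) : PySem.Int.floordiv (n : Int) 2 = ((n / 2 : Nat) : Int) := by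
  exact_mod_cast PySem.Int.floordiv_natCast n 2

-- A's frequency update always stores prefix-count + 1
lemma freq_step (freq : PySem.Dict Int Int) (pre : List Int) (n : Int)
    (hinv : ∀ w : Int, PySem.Dict.getD freq w 0 = (pre.count w : Int)) (w : Int) :
    PySem.Dict.getD
      (if PySem.Dict.contains freq n
        then PySem.Dict.insert freq n (PySem.Dict.getD freq n 0 + 1)
        else PySem.Dict.insert freq n 1) w 0 = ((pre ++ [n]).count w : Int) := by
  by_cases hw : w = n
  · subst hw
    by_cases hc : PySem.Dict.contains freq w = true
    · rw [if_pos hc, PySem.Dict.getD_insert_self, hinv w]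
      simp [List.count_append]
    · have hcf : PySem.Dict.contains freq w = false := by simpa using hc
      have h0 : PySem.Dict.getD freq w 0 = 0 := PySem.Dict.getD_of_not_contains _ _ hcf
      have hc0 : pre.count w = 0 := by
        have := (hinv w).symm.trans h0
        exact_mod_cast this
      rw [if_neg hc, PySem.Dict.getD_insert_self]
      simp [List.count_append, hc0]
  · have hne : ∀ v : Int, PySem.Dict.getD (PySem.Dict.insert freq n v) w 0
        = PySem.Dict.getD freq w 0 := fun v => PySem.Dict.getD_insert_of_ne _ _ _ hw
    split <;> rw [hne, hinv w] <;> simp [List.count_append, Ne.symm hw]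

-- no value crosses: A's loop runs to the end
lemma loopA_none (A : List Int) (hmaj : ∀ w : Int, A.count w ≤ A.length / 2) :
    ∀ (rest pre : List Int) (freq : PySem.Dict Int Int) (idx : Int),
      A = pre ++ rest →
      (∀ w : Int, PySem.Dict.getD freq w 0 = (pre.count w : Int)) →
      solLoopA rest (A.length : Int) idx freq = -1 := by
  intro rest
  induction rest with
  | nil => intro pre freq idx hA hinv; simp [solLoopA]
  | cons n rest ih =>
    intro pre freq idx hA hinv
    have hstep := freq_step freq pre n hinv
    have hcnt : pre.count n + 1 ≤ A.count n := by
      have : A.count n = pre.count n + (n :: rest).count n := by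
        rw [hA, List.count_append]
      rw [List.count_cons_self] at this
      omega
    have happ : (pre ++ [n]).count n = pre.count n + 1 := by simp
    have hle : ¬ (((pre ++ [n]).count n : Int) > PySem.Int.floordiv (A.length : Int) 2) := by
      rw [floordiv_len, happ]
      have := hmaj n
      push_cast
      omega
    simp only [solLoopA, hstep n, if_neg hle]
    exact ih (pre ++ [n]) _ (idx + 1) (by simp [hA]) hstep

-- v is the (unique) dominator: A's loop and B's targeted scan agree step for step
lemma loopA_eq_scan (A : List Int) (v : Int) (hv : A.length / 2 < A.count v) :
    ∀ (rest pre : List Int) (freq : PySem.Dict Int Int) (idx : Int),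
      A = pre ++ rest →
      (∀ w : Int, PySem.Dict.getD freq w 0 = (pre.count w : Int)) →
      solLoopA rest (A.length : Int) idx freq
        = solAltScan rest v (PySem.Int.floordiv (A.length : Int) 2) (pre.count v : Int) idx := by
  intro rest
  induction rest with
  | nil => intro pre freq idx hA hinv; simp [solLoopA, solAltScan]
  | cons n rest ih =>
    intro pre freq idx hA hinv
    have hstep := freq_step freq pre n hinv
    have hrec := ih (pre ++ [n]) _ (idx + 1) (by simp [hA]) hstep
    by_cases hn : n = v
    · subst hn
      have hc : ((pre ++ [n]).count n : Int) = (pre.count n : Int) + 1 := by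
        simp [List.count_append]
      simp only [solLoopA, solAltScan, hstep n, hc, BEq.rfl, if_true]
      split
      · rfl
      · rw [hrec, hc]
    · -- n is not the dominator, so its count never crosses
      have hcnt : pre.count n + 1 ≤ A.count n := by
        have : A.count n = pre.count n + (n :: rest).count n := by
          rw [hA, List.count_append]
        rw [List.count_cons_self] at this
        omega
      have hnle : A.count n ≤ A.length / 2 := by
        by_contra hgt
        exact hn (uniq_major A n v (by omega) hv)
      have happ : (pre ++ [n]).count n = pre.count n + 1 := by simp
      have hle : ¬ (((pre ++ [n]).count n : Int) > PySem.Int.floordiv (A.length : Int) 2) := by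
        rw [floordiv_len, happ]; push_cast; omega
      have hbe : (n == v) = false := by simp [hn]
      simp only [solLoopA, solAltScan, hstep n, if_neg hle, hbe, Bool.false_eq_true, if_false]
      rw [hrec]; congr 1
      simp [List.count_append, hn]

lemma solution_eq_loop (A : List Int) (h : A ≠ []) :
    solution A = solLoopA A (A.length : Int) 0 PySem.Dict.empty := by
  match A, h with
  | [x], _ =>
    simp [solution, solLoopA, PySem.Dict.contains_empty, PySem.Dict.getD_insert_self]
  | x :: y :: rest, _ =>
    have h0 : ¬ (((x :: y :: rest).length : Int) == 0) = true := by
      simp; omega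
    have h1 : ¬ (((x :: y :: rest).length : Int) == 1) = true := by
      simp; omega
    simp only [solution, if_neg h0, if_neg h1]

lemma counts_items (A : List Int) :
    PySem.Dict.items
        (A.foldl (fun d x => PySem.Dict.insert d x (PySem.Dict.getD d x 0 + 1)) PySem.Dict.empty)
      = (PySem.Set.ofList A).map (fun k => (k, (A.count k : Int))) := by
  rw [PySem.Dict.foldl_insert_getD_add_one_eq_counter, PySem.Dict.items_counter]

-- ===== VERDICT (by name: the statement is the Claim_ definition above) =====
theorem solution_spec : Claim_equal_solution := by
  intro A _
  unfold Spec_solution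
  rcases eq_or_ne A [] with rfl | hne
  · rfl
  · rw [solution_eq_loop A hne]
    simp only [solution_alt]
    rw [counts_items, List.find?_map]
    by_cases hmaj : ∃ v : Int, A.length / 2 < A.count v
    · obtain ⟨v, hv⟩ := hmaj
      have hvA : v ∈ A := by
        have : 0 < A.count v := by omega
        exact List.count_pos_iff.mp this
      have hfind : ∃ k, (PySem.Set.ofList A).find?
          ((fun vc => decide (vc.2 > PySem.Int.floordiv (A.length : Int) 2)) ∘
            (fun k => (k, (A.count k : Int)))) = some k := by
        apply Option.isSome_iff_exists.mp
        rw [List.find?_isSome]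
        refine ⟨v, (PySem.Set.mem_ofList _ _).mpr hvA, ?_⟩
        simp only [Function.comp, floordiv_len]
        push_cast
        simp; omega
      obtain ⟨k, hk⟩ := hfind
      have hpk := List.find?_some hk
      simp only [Function.comp, floordiv_len, decide_eq_true_eq] at hpk
      have hkv : k = v := by
        apply uniq_major A k v _ hv
        exact_mod_cast (by push_cast at hpk; omega : (A.length / 2 : Int) < (A.count k : Int))
      subst hkv
      rw [hk]
      simp only [Option.map_some]
      have := loopA_eq_scan A k hv A [] PySem.Dict.empty 0 rfl
        (fun w => by simp [PySem.Dict.getD_empty])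
      simpa using this
    · push Not at hmaj
      have hfind : (PySem.Set.ofList A).find?
          ((fun vc => decide (vc.2 > PySem.Int.floordiv (A.length : Int) 2)) ∘
            (fun k => (k, (A.count k : Int)))) = none := by
        rw [List.find?_eq_none]
        intro k _
        simp only [Function.comp, floordiv_len, decide_eq_true_eq]
        have := hmaj k
        push_cast
        omega
      rw [hfind]
      simp only [Option.map_none]
      exact loopA_none A hmaj A [] PySem.Dict.empty 0 rfl
        (fun w => by simp [PySem.Dict.getD_empty])
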